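-- pv_equiv track=rewrite | github.com/stratocube/ProjectEuler | src/page4/Problem169.py | eval_rep
-- ===== SOURCE A (Python) =====
-- def eval_rep(rep):
--     idx = 0
--     while rep[idx] == '1':
--         idx += 1
--         if idx == len(rep):
--             return 1
--
--     m = 0
--     while rep[idx] == '0':
--         idx += 1
--         m += 1
--
--     if idx == len(rep)-1:
--         return m+1
--
--     return eval_rep(rep[idx+1:]) + m*eval_rep('0' + rep[idx+1:])
-- ===== SOURCE B (Python) =====
-- def eval_rep(rep):
--     # Linear right-to-left DP: f = value of the suffix, g = value of '0'+suffix.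
--     f, g = 1, 1
--     for ch in reversed(rep):
--         if ch == '0':
--             f, g = g, 2 * g - f
--         else:
--             f, g = f, f + g
--     return f
-- ===== Notes on version B (the rewrite author's own statement) =====
-- stated objective: faster
-- what changed: Replaced the exponential two-branch recursion on suffixes with a single right-to-left linear scan maintaining the pair (value of suffix, value of '0'+suffix).
import Mathlib
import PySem

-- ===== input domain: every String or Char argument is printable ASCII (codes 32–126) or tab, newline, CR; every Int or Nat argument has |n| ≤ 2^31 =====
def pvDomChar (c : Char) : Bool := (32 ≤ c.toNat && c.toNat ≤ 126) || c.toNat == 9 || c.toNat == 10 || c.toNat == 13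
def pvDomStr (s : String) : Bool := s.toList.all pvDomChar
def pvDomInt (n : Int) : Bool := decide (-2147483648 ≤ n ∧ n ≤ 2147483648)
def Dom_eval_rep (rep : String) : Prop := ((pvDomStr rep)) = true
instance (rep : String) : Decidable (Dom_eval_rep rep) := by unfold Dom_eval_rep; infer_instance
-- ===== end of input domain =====

-- B replaces A's exponential two-branch recursion by a linear right-to-left scan with a state pair (faster, asymptotic).

-- ===== PORT A =====
-- Literal port of A on List Char: the two while loops are the two takeWhile runs
-- (a = leading '1'-run, b = following '0'-run), then the same branch order and the
-- same two recursive calls. The fuel argument is only a totality guard: 2·len+2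
-- bounds the recursion measure, so the 0-fuel branch is never reached (the proof
-- below never uses it on admitted inputs). Where Python raises IndexError (idx
-- walks off the end in the zero loop, i.e. a+b = length with the string not all
-- '1's) the port returns 0; exactly those inputs are excluded by Pre_eval_rep.
def evalRepAux : Nat → List Char → Int
  | 0, _ => 0
  | fuel + 1, s =>
    let a := (s.takeWhile (· = '1')).length
    if _h1 : a = s.length then 1
    else
      let b := ((s.drop a).takeWhile (· = '0')).length
      if _h2 : a + b = s.length then 0  -- A raises IndexError here; outside Pre_
      else if _h3 : a + b = s.length - 1 then (b : Int) + 1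
      else evalRepAux fuel (s.drop (a + b + 1)) + (b : Int) * evalRepAux fuel ('0' :: s.drop (a + b + 1))

def eval_rep (rep : String) : Int := evalRepAux (2 * rep.toList.length + 2) rep.toList

-- ===== PORT B =====
-- Source B: a left fold over reversed(rep) = List.foldr; state (f, g) = (value of suffix, value of '0'+suffix)
def dpStep (c : Char) (p : Int × Int) : Int × Int :=
  if c = '0' then (p.2, 2 * p.2 - p.1) else (p.1, p.1 + p.2)

def dpList (s : List Char) : Int × Int := s.foldr dpStep (1, 1)

def eval_rep_alt (rep : String) : Int := (dpList rep.toList).1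

-- ===== PRECONDITION & SPEC =====
-- Pre_ excludes exactly the inputs on which A raises IndexError: the empty string
-- and strings whose last character is '0' (the zero loop walks off the end).
def Pre_eval_rep (rep : String) : Prop :=
  rep.toList ≠ [] ∧ rep.toList.getLast? ≠ some '0'
instance (rep : String) : Decidable (Pre_eval_rep rep) := by unfold Pre_eval_rep; infer_instance

def pvWitness_eval_rep : String := "10101"

def Spec_eval_rep (rep : String) (out : Int) : Prop := out = eval_rep_alt rep
instance (rep : String) (out : Int) : Decidable (Spec_eval_rep rep out) := by unfold Spec_eval_rep; infer_instance

-- ===== CLAIM (what is proved, stated in full; the proofs are below) =====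
def Claim_equal_eval_rep : Prop := ∀ (rep : String), Dom_eval_rep rep → Pre_eval_rep rep → Spec_eval_rep rep (eval_rep rep)

-- ===== LEMMAS AND PROOFS =====

lemma dp_cons_ne (c : Char) (hc : c ≠ '0') (u : List Char) :
    dpList (c :: u) = ((dpList u).1, (dpList u).1 + (dpList u).2) := by
  simp [dpList, dpStep, hc]

lemma dp_cons_zero (u : List Char) :
    dpList ('0' :: u) = ((dpList u).2, 2 * (dpList u).2 - (dpList u).1) := by
  simp [dpList, dpStep]

-- prepending '1's keeps the first component of the DP state
lemma dp_ones_prefix (a : Nat) (u : List Char) :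
    (dpList (List.replicate a '1' ++ u)).1 = (dpList u).1 := by
  induction a with
  | zero => simp
  | succ n ih =>
      rw [List.replicate_succ, List.cons_append, dp_cons_ne '1' (by decide)]
      exact ih

-- prepending b '0's shifts both components by b · (g − f)
lemma dp_zeros_prefix (b : Nat) (u : List Char) :
    dpList (List.replicate b '0' ++ u)
      = ((dpList u).1 + b * ((dpList u).2 - (dpList u).1),
         (dpList u).2 + b * ((dpList u).2 - (dpList u).1)) := by
  induction b with
  | zero => simp
  | succ n ih =>
      rw [List.replicate_succ, List.cons_append, dp_cons_zero, ih]
      simp only [Prod.mk.injEq]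
      push_cast
      constructor <;> ring

lemma takeWhile_eq_replicate (c : Char) (s : List Char) :
    s.takeWhile (· = c) = List.replicate (s.takeWhile (· = c)).length c := by
  apply List.eq_replicate_of_mem
  intro x hx
  have := List.mem_takeWhile_imp hx
  simpa using this

lemma drop_takeWhile_len (p : Char → Bool) (s : List Char) :
    s.drop (s.takeWhile p).length = s.dropWhile p := by
  induction s with
  | nil => rfl
  | cons x xs ih =>
      by_cases hx : p x = true
      · rw [List.takeWhile_cons_of_pos hx, List.dropWhile_cons_of_pos hx, List.length_cons,
          List.drop_succ_cons]
        exact ih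
      · rw [List.takeWhile_cons_of_neg hx, List.dropWhile_cons_of_neg hx]
        rfl

-- s is its maximal c-run followed by the rest
lemma split_run (c : Char) (s : List Char) :
    s = List.replicate (s.takeWhile (· = c)).length c ++ s.drop (s.takeWhile (· = c)).length := by
  rw [drop_takeWhile_len, ← takeWhile_eq_replicate]
  exact (List.takeWhile_append_dropWhile (p := (· = c)) (l := s)).symm

lemma head_dropWhile_ne (p : Char → Bool) :
    ∀ (s : List Char) (c : Char) (t : List Char), s.dropWhile p = c :: t → p c = false := by
  intro s
  induction s with
  | nil => intro c t h; simp at h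
  | cons x xs ih =>
      intro c t h
      by_cases hx : p x = true
      · rw [List.dropWhile_cons_of_pos hx] at h; exact ih _ _ h
      · rw [List.dropWhile_cons_of_neg hx] at h
        cases h
        simpa using hx

lemma getLast?_append_ne {α : Type} (xs ys : List α) (h : ys ≠ []) :
    (xs ++ ys).getLast? = ys.getLast? := by
  cases ys with
  | nil => exact absurd rfl h
  | cons y ys' =>
      have hs : (y :: ys').getLast? ≠ none := by simp [List.getLast?_eq_none_iff]
      obtain ⟨v, hv⟩ := Option.ne_none_iff_exists'.mp hs
      rw [List.getLast?_append, hv, Option.some_or]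

-- main invariant: with enough fuel, A's port computes the first DP component
lemma evalRepAux_eq_dp : ∀ (fuel : Nat) (s : List Char), 2 * s.length + 2 ≤ fuel → s ≠ [] →
    s.getLast? ≠ some '0' → evalRepAux fuel s = (dpList s).1 := by
  intro fuel
  induction fuel with
  | zero => intro s hf _ _; omega
  | succ n ih =>
      intro s hf hne hlast
      rw [evalRepAux]
      set a := (s.takeWhile (· = '1')).length with ha_def
      have hsplit1 : s = List.replicate a '1' ++ s.drop a := by
        rw [ha_def]; exact split_run '1' s
      have ha_le : a ≤ s.length := by
        rw [ha_def]; exact (List.takeWhile_sublist _).length_le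
      by_cases h1 : a = s.length
      · -- all-'1' string
        simp only [dif_pos h1]
        have hz : s.drop a = [] := by
          apply List.eq_nil_of_length_eq_zero
          simp [h1]
        rw [hsplit1, hz, dp_ones_prefix]
        simp [dpList]
      · simp only [dif_neg h1]
        set z := s.drop a with hz_def
        set b := (z.takeWhile (· = '0')).length with hb_def
        have hsplit2 : z = List.replicate b '0' ++ z.drop b := by
          rw [hb_def]; exact split_run '0' z
        have hb_le : b ≤ z.length := by
          rw [hb_def]; exact (List.takeWhile_sublist _).length_le
        have hzlen : z.length = s.length - a := by rw [hz_def]; simp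
        by_cases h2 : a + b = s.length
        · -- A would raise here: the precondition forbids it (last char would be '0')
          exfalso
          have hb1 : 1 ≤ b := by omega
          have hzb : z.drop b = [] := by
            apply List.eq_nil_of_length_eq_zero
            simp
            omega
          apply hlast
          rw [hsplit1, hsplit2, hzb, List.append_nil,
            getLast?_append_ne _ _ (by simp; omega), List.getLast?_replicate]
          simp
          omega
        · simp only [dif_neg h2]
          have hrlen : (z.drop b).length = s.length - a - b := by simp [hzlen]
          obtain ⟨c, t, hct⟩ : ∃ c t, z.drop b = c :: t := by
            cases hzd : z.drop b with
            | nil =>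
                exfalso
                rw [hzd] at hrlen
                simp at hrlen
                omega
            | cons c t => exact ⟨c, t, rfl⟩
          have hc0 : c ≠ '0' := by
            have hdw : z.dropWhile (· = '0') = c :: t := by
              rw [← drop_takeWhile_len (· = '0') z, ← hb_def, hct]
            have := head_dropWhile_ne _ z c t hdw
            simpa using this
          have htlen' : t.length + 1 = s.length - a - b := by
            rw [← hrlen, hct]
            simp
          have hdrop : s.drop (a + b + 1) = t := by
            have h' : s.drop (a + b + 1) = (z.drop b).drop 1 := by
              rw [hz_def, List.drop_drop, List.drop_drop]
              ring_nf
            rw [h', hct, List.drop_one, List.tail_cons]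
          have hsplit : s = List.replicate a '1' ++ (List.replicate b '0' ++ (c :: t)) := by
            rw [← hct, ← hsplit2, ← hsplit1]
          by_cases h3 : a + b = s.length - 1
          · -- s = 1^a 0^b c : A returns b + 1
            simp only [dif_pos h3]
            have ht : t = [] := by
              apply List.eq_nil_of_length_eq_zero
              omega
            subst ht
            rw [hsplit, dp_ones_prefix, dp_zeros_prefix]
            have hc1 : dpList [c] = (1, 2) := by simp [dpList, dpStep, hc0]
            rw [hc1]
            push_cast
            ring
          · simp only [dif_neg h3]
            rw [hdrop]
            have htne : t ≠ [] := by
              intro h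
              rw [h] at htlen'
              simp at htlen'
              omega
            have hlastt : t.getLast? ≠ some '0' := by
              have he : s.getLast? = t.getLast? := by
                rw [hsplit, getLast?_append_ne _ _ (by simp),
                  getLast?_append_ne _ _ (by simp),
                  ← List.singleton_append, getLast?_append_ne _ _ htne]
              rw [← he]; exact hlast
            have htf : 2 * t.length + 2 ≤ n := by omega
            have hF : evalRepAux n t = (dpList t).1 := ih t htf htne hlastt
            by_cases hb0 : b = 0
            · -- the b·(…) factor vanishes; the second recursive value is irrelevant
              rw [hF, hsplit, hb0]
              simp only [List.replicate_zero, List.nil_append, Nat.cast_zero, zero_mul, add_zero]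
              rw [dp_ones_prefix, dp_cons_ne c hc0]
            · -- b ≥ 1: the second call still has enough fuel
              have hf0t : 2 * ('0' :: t).length + 2 ≤ n := by simp; omega
              have hlast0t : ('0' :: t).getLast? ≠ some '0' := by
                rw [← List.singleton_append, getLast?_append_ne _ _ htne]
                exact hlastt
              have hG : evalRepAux n ('0' :: t) = (dpList ('0' :: t)).1 :=
                ih ('0' :: t) hf0t (by simp) hlast0t
              rw [hF, hG, dp_cons_zero, hsplit, dp_ones_prefix, dp_zeros_prefix,
                dp_cons_ne c hc0]
              dsimp only
              ring

-- ===== VERDICT (by name: the statement is the Claim_ definition above) =====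
theorem eval_rep_spec : Claim_equal_eval_rep := by
  intro rep _ hpre
  unfold Spec_eval_rep eval_rep eval_rep_alt
  exact evalRepAux_eq_dp (2 * rep.toList.length + 2) rep.toList le_rfl hpre.1 hpre.2
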